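-- pv_equiv track=rewrite | github.com/markaaronslater/NMT | src/postprocessing/postprocess.py | naive_recase
-- ===== SOURCE A (Python) =====
-- eos_symbols = {".", "!", "?", ":", "..", "...", "...."}
--
-- def naive_recase(sent):
--     if not sent:
--         return sent # if predicted 'empty-sentence' (immediately predicted eos token)
--
--     # all locations of sentence containing an eos symbol, other than the
--     # final one (which has no word following it, so nothing to capitalize).
--     eos_positions = [i for i, word in enumerate(sent) if word in eos_symbols and i != len(sent)-1]
--     quote_positions = [i for i, word in enumerate(sent) if word == '"' and i != len(sent)-1]
--
--     # capitalize first word of each sentence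
--     sent[0] = sent[0].capitalize()
--     for j in eos_positions:
--         sent[j+1] = sent[j+1].capitalize()
--
--     # capitalize the first word inside each pair of double-quotes
--     for i in quote_positions[::2]:
--         sent[i+1] = sent[i+1].capitalize()
--
--     # capitalize the first word after each pair of double quotes (only if
--     # word before endquote was an eos symbol)
--     for j in quote_positions[1::2]:
--         if j-1 in eos_positions:
--             sent[j+1] = sent[j+1].capitalize()
--
--     return sent
-- ===== SOURCE B (Python) =====
-- eos_symbols = {".", "!", "?", ":", "..", "...", "...."}
--
-- def naive_recase(sent):
--     # Single left-to-right scan with a running quote-parity counter instead of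
--     # precomputed position tables; builds a new list (does not mutate sent).
--     if not sent:
--         return sent
--     out = []
--     quotes = 0
--     cap_next = True  # first word of the sentence is always capitalized
--     for i, w in enumerate(sent):
--         out.append(w.capitalize() if cap_next else w)
--         if i == len(sent) - 1:
--             cap_next = False  # nothing follows; triggers at the last index never fire
--         elif w in eos_symbols:
--             cap_next = True
--         elif w == '"':
--             # even parity: opening quote -> capitalize what follows;
--             # odd parity: closing quote -> only if the word before it ended a sentence
--             cap_next = quotes % 2 == 0 or sent[i - 1] in eos_symbols
--             quotes += 1
--         else:
--             cap_next = False
--     return out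
-- ===== Notes on version B (the rewrite author's own statement) =====
-- stated objective: alternative
-- what changed: Replaces the precomputed eos/quote position tables and four separate capitalization passes by one left-to-right scan carrying a running quote-parity counter and a cap-next flag, building the result in a single pass (B returns a new list instead of mutating sent in place).
import Mathlib
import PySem

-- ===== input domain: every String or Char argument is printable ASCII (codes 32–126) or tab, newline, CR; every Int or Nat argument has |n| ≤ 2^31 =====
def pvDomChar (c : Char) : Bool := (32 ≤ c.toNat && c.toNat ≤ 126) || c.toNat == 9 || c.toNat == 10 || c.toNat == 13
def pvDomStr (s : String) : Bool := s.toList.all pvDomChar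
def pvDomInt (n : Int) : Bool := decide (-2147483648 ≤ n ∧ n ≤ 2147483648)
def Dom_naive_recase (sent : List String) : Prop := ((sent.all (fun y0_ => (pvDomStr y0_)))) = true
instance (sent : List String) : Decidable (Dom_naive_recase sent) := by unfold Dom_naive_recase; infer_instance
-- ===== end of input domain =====

-- B replaces A's precomputed eos/quote position tables and four capitalization passes by one
-- left-to-right scan with a running quote-parity counter (objective: alternative decomposition).
-- A mutates `sent` in place; B builds a new list — the equivalence proved here is about the
-- RETURN value only.

-- ===== PORT A =====
-- shared vocabulary: the module constant eos_symbols and str.capitalize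
def eosL : List String := [".", "!", "?", ":", "..", "...", "...."]

-- hand port of str.capitalize (upper-case first char, lower-case the rest); exact on the
-- printable-ASCII domain, where Python's title-casing of the first char is plain upper-casing.
def capW (w : String) : String :=
  match w.toList with
  | [] => w
  | c :: cs => String.ofList (PySem.Chars.upperChar c :: cs.map PySem.Chars.lowerChar)

def naive_recase (sent : List String) : List String :=
  if sent = [] then sent
  else
    let eosP : List Int := ((PySem.List.enumerate sent).filter
        (fun p => decide (p.2 ∈ eosL ∧ p.1 ≠ (sent.length : Int) - 1))).map (·.1)
    let quoteP : List Int := ((PySem.List.enumerate sent).filter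
        (fun p => decide (p.2 = "\"" ∧ p.1 ≠ (sent.length : Int) - 1))).map (·.1)
    let s0 := PySem.List.pySetD sent 0 (capW (PySem.List.pyGetD sent 0 ""))
    let s1 := eosP.foldl
        (fun acc j => PySem.List.pySetD acc (j + 1) (capW (PySem.List.pyGetD acc (j + 1) ""))) s0
    -- quote_positions[::2]
    let s2 := ((PySem.List.slice? quoteP none none 2).getD []).foldl
        (fun acc i => PySem.List.pySetD acc (i + 1) (capW (PySem.List.pyGetD acc (i + 1) ""))) s1
    -- quote_positions[1::2]
    let s3 := ((PySem.List.slice? quoteP (some 1) none 2).getD []).foldl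
        (fun acc j => if j - 1 ∈ eosP
          then PySem.List.pySetD acc (j + 1) (capW (PySem.List.pyGetD acc (j + 1) "")) else acc) s2
    s3

-- ===== PORT B =====
-- one pass: i = current index, quotes = '"'-count so far, capNext = capitalize current word?
-- (Python's short-circuit `or` never reads sent[i-1] at i = 0 — parity is even there — so the
-- truncated Nat subtraction in the lookback is exact.)
def altGo (sent : List String) (n : Nat) : List String → Nat → Nat → Bool → List String
  | [], _, _, _ => []
  | w :: rest, i, quotes, capNext =>
    let w' := if capNext then capW w else w
    let st :=
      if i = n - 1 then (false, quotes)
      else if w ∈ eosL then (true, quotes)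
      else if w = "\"" then
        (decide (quotes % 2 = 0) || decide (sent.getD (i - 1) "" ∈ eosL), quotes + 1)
      else (false, quotes)
    w' :: altGo sent n rest (i + 1) st.2 st.1

def naive_recase_alt (sent : List String) : List String :=
  if sent = [] then sent
  else altGo sent sent.length sent 0 0 true

-- ===== PRECONDITION & SPEC =====
def Spec_naive_recase (sent : List String) (out : List String) : Prop := out = naive_recase_alt sent
instance (sent : List String) (out : List String) : Decidable (Spec_naive_recase sent out) := by unfold Spec_naive_recase; infer_instance

-- ===== CLAIM (what is proved, stated in full; the proofs are below) =====
def Claim_equal_naive_recase : Prop := ∀ (sent : List String), Dom_naive_recase sent → Spec_naive_recase sent (naive_recase sent)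

-- ===== LEMMAS AND PROOFS =====
-- Both ports are reduced to one pointwise description: position k is capitalized iff
-- capIdx sent n k, where everything is read from the ORIGINAL sent.

-- quotes strictly before index i
def quoteCnt (sent : List String) (i : Nat) : Nat :=
  (List.range i).countP (fun t => decide (sent.getD t "" = "\""))

-- does index j trigger capitalization of position j+1?
def trigB (sent : List String) (n j : Nat) : Bool :=
  if j = n - 1 then false
  else if sent.getD j "" ∈ eosL then true
  else if sent.getD j "" = "\"" then
    decide (quoteCnt sent j % 2 = 0) || decide (sent.getD (j - 1) "" ∈ eosL)
  else false

def capIdx (sent : List String) (n : Nat) : Nat → Bool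
  | 0 => true
  | k + 1 => trigB sent n k

def specGo (sent : List String) (n : Nat) : List String → Nat → List String
  | [], _ => []
  | w :: rest, i => (if capIdx sent n i then capW w else w) :: specGo sent n rest (i + 1)

-- every other element, starting with the first (b = true) or the second (b = false)
def everyOther {α : Type} (b : Bool) : List α → List α
  | [] => []
  | x :: xs => if b then x :: everyOther false xs else everyOther true xs

def applyCaps (ps : List Nat) (xs : List String) : List String :=
  ps.foldl (fun acc p => acc.set p (capW (acc.getD p ""))) xs


-- ---------- characters / capitalize ----------
theorem pv_toNat_ofNat (n : Nat) (h : n < 55296) : (Char.ofNat n).toNat = n := by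
  unfold Char.ofNat
  rw [dif_pos (by constructor; omega)]
  unfold Char.ofNatAux Char.toNat
  simp [UInt32.toNat_ofNatLT]

theorem pv_char_le (a b : Char) : a ≤ b ↔ a.toNat ≤ b.toNat := Iff.rfl

theorem upperChar_idem (c : Char) :
    PySem.Chars.upperChar (PySem.Chars.upperChar c) = PySem.Chars.upperChar c := by
  have ha : ('a' : Char).toNat = 97 := by decide
  have hz : ('z' : Char).toNat = 122 := by decide
  unfold PySem.Chars.upperChar
  by_cases h : PySem.Chars.islower c = true
  · rw [if_pos h, if_neg]
    simp only [PySem.Chars.islower, Bool.and_eq_true, decide_eq_true_eq, pv_char_le,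
      ha, hz] at h ⊢
    rw [pv_toNat_ofNat _ (by omega)]
    omega
  · rw [if_neg h, if_neg h]

theorem lowerChar_idem (c : Char) :
    PySem.Chars.lowerChar (PySem.Chars.lowerChar c) = PySem.Chars.lowerChar c := by
  have ha : ('A' : Char).toNat = 65 := by decide
  have hz : ('Z' : Char).toNat = 90 := by decide
  unfold PySem.Chars.lowerChar
  by_cases h : PySem.Chars.isupper c = true
  · rw [if_pos h, if_neg]
    simp only [PySem.Chars.isupper, Bool.and_eq_true, decide_eq_true_eq, pv_char_le,
      ha, hz] at h ⊢
    rw [pv_toNat_ofNat _ (by omega)]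
    omega
  · rw [if_neg h, if_neg h]

theorem capW_idem (w : String) : capW (capW w) = capW w := by
  unfold capW
  cases hw : w.toList with
  | nil => simp [hw]
  | cons c cs =>
      simp only [hw, String.toList_ofList]
      simp only [List.map_map]
      rw [upperChar_idem,
        show PySem.Chars.lowerChar ∘ PySem.Chars.lowerChar = PySem.Chars.lowerChar from
          funext lowerChar_idem]

-- ---------- Int/Nat position-list glue ----------
theorem mem_map_natCast_sub_one (L : List Nat) (j : Nat) :
    ((j : Int) - 1 ∈ L.map (fun (i : Nat) => (i : Int))) ↔ (1 ≤ j ∧ j - 1 ∈ L) := by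
  rw [List.mem_map]
  constructor
  · rintro ⟨i, hi, hij⟩
    have hj : j = i + 1 := by omega
    subst hj
    exact ⟨by omega, by simpa using hi⟩
  · rintro ⟨h1, h2⟩
    exact ⟨j - 1, h2, by omega⟩

theorem enumFilter_eq (xs : List String) (q : Int → String → Bool) :
    ((PySem.List.enumerate xs).filter (fun p => q p.1 p.2)).map (·.1)
      = ((List.range xs.length).filter (fun (i : Nat) => q (i : Int) (xs.getD i ""))).map
          (fun (i : Nat) => (i : Int)) := by
  rw [PySem.List.enumerate_eq_map_pyRange xs ""]
  rw [show PySem.List.len xs = ((xs.length : Int)) from by simp [PySem.List.len]]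
  rw [PySem.List.pyRange_one]
  simp only [zero_add, Int.sub_zero, Int.toNat_natCast, List.map_map, List.filter_map]
  refine Eq.trans (congrArg (List.map _) (List.filter_congr ?_)) (List.map_congr_left ?_)
  · intro i _
    simp [Function.comp_def, PySem.List.pyGetD_natCast]
  · intro i _
    simp [Function.comp_def]

-- Nat versions of A's position tables
def natEos (sent : List String) : List Nat :=
  (List.range sent.length).filter
    (fun i => decide (sent.getD i "" ∈ eosL ∧ i ≠ sent.length - 1))

def natQuote (sent : List String) : List Nat :=
  (List.range sent.length).filter
    (fun i => decide (sent.getD i "" = "\"" ∧ i ≠ sent.length - 1))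

theorem eosP_eq (sent : List String) (h : sent ≠ []) :
    ((PySem.List.enumerate sent).filter
        (fun p => decide (p.2 ∈ eosL ∧ p.1 ≠ (sent.length : Int) - 1))).map (·.1)
      = (natEos sent).map (fun (i : Nat) => (i : Int)) := by
  rw [enumFilter_eq sent (fun a b => decide (b ∈ eosL ∧ a ≠ (sent.length : Int) - 1))]
  unfold natEos
  apply congrArg
  apply List.filter_congr
  intro i hi
  have hn : 1 ≤ sent.length := by
    cases sent with
    | nil => exact absurd rfl h
    | cons a l => simp
  simp only [decide_eq_decide]
  constructor
  · rintro ⟨h1, h2⟩; exact ⟨h1, by omega⟩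
  · rintro ⟨h1, h2⟩; exact ⟨h1, by omega⟩

theorem quoteP_eq (sent : List String) (h : sent ≠ []) :
    ((PySem.List.enumerate sent).filter
        (fun p => decide (p.2 = "\"" ∧ p.1 ≠ (sent.length : Int) - 1))).map (·.1)
      = (natQuote sent).map (fun (i : Nat) => (i : Int)) := by
  rw [enumFilter_eq sent (fun a b => decide (b = "\"" ∧ a ≠ (sent.length : Int) - 1))]
  unfold natQuote
  apply congrArg
  apply List.filter_congr
  intro i hi
  have hn : 1 ≤ sent.length := by
    cases sent with
    | nil => exact absurd rfl h
    | cons a l => simp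
  simp only [decide_eq_decide]
  constructor
  · rintro ⟨h1, h2⟩; exact ⟨h1, by omega⟩
  · rintro ⟨h1, h2⟩; exact ⟨h1, by omega⟩

-- ---------- step-2 slices ----------
theorem everyOther_map {α β : Type} (f : α → β) (b : Bool) (L : List α) :
    everyOther b (L.map f) = (everyOther b L).map f := by
  induction L generalizing b with
  | nil => simp [everyOther]
  | cons x xs ih =>
      cases b <;> simp [everyOther, ih]

theorem mem_everyOther {α : Type} (b : Bool) (L : List α) (a : α)
    (h : a ∈ everyOther b L) : a ∈ L := by
  induction L generalizing b with
  | nil => simp [everyOther] at h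
  | cons x xs ih =>
      cases b with
      | false => exact List.mem_cons_of_mem x (ih true h)
      | true =>
          simp only [everyOther, if_pos] at h
          rcases List.mem_cons.mp h with h | h
          · simp [h]
          · exact List.mem_cons_of_mem x (ih false h)

theorem fm_evens {α : Type} : ∀ (xs : List α),
    List.filterMap (fun k => xs[2 * k]?) (List.range ((xs.length + 1) / 2))
      = everyOther true xs
  | [] => by simp [everyOther]
  | [x] => by simp [everyOther, List.range_succ]
  | x :: y :: rest => by
      have hc : ((x :: y :: rest).length + 1) / 2 = (rest.length + 1) / 2 + 1 := by
        simp; omega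
      rw [hc, List.range_succ_eq_map]
      simp only [List.filterMap_cons, List.filterMap_map]
      have h2 : ((fun k => (x :: y :: rest)[2 * k]?) ∘ Nat.succ) = fun k => rest[2 * k]? := by
        funext k
        show (x :: y :: rest)[2 * (k + 1)]? = rest[2 * k]?
        have : 2 * (k + 1) = 2 * k + 2 := by omega
        simp [this]
      rw [h2, fm_evens rest]
      simp [everyOther]

theorem fm_odds {α : Type} : ∀ (xs : List α),
    List.filterMap (fun k => xs[1 + 2 * k]?) (List.range (xs.length / 2))
      = everyOther false xs
  | [] => by simp [everyOther]
  | [x] => by simp [everyOther]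
  | x :: y :: rest => by
      have hc : (x :: y :: rest).length / 2 = rest.length / 2 + 1 := by
        simp; omega
      rw [hc, List.range_succ_eq_map]
      simp only [List.filterMap_cons, List.filterMap_map]
      have h2 : ((fun k => (x :: y :: rest)[1 + 2 * k]?) ∘ Nat.succ) = fun k => rest[1 + 2 * k]? := by
        funext k
        show (x :: y :: rest)[1 + 2 * (k + 1)]? = rest[1 + 2 * k]?
        have : 1 + 2 * (k + 1) = (1 + 2 * k) + 2 := by omega
        simp [this]
      rw [h2, fm_odds rest]
      simp [everyOther]

theorem slice2_none {α : Type} (xs : List α) :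
    PySem.List.slice? xs none none 2 = some (everyOther true xs) := by
  rw [← fm_evens]
  simp only [PySem.List.slice?, PySem.List.sliceIndices]
  norm_num
  have hcount : (if 0 < xs.length then (((xs.length : Int) + 2 - 1) / 2).toNat else 0)
      = (xs.length + 1) / 2 := by
    split_ifs with h
    · omega
    · omega
  rw [hcount]
  apply List.filterMap_congr
  intro k _
  have : ((2 : Int) * (k : Int)).toNat = 2 * k := by omega
  rw [this]


theorem slice2_one {α : Type} (xs : List α) :
    PySem.List.slice? xs (some 1) none 2 = some (everyOther false xs) := by
  rw [← fm_odds]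
  simp only [PySem.List.slice?, PySem.List.sliceIndices]
  norm_num
  by_cases h0 : xs.length = 0
  · simp [h0]
  · have hmin : min (1 : Int) (xs.length : Int) = 1 := by omega
    rw [hmin]
    have hcount : (if 1 < xs.length then (((xs.length : Int) - 1 + 2 - 1) / 2).toNat else 0)
        = xs.length / 2 := by
      split_ifs with h <;> omega
    rw [hcount]
    apply List.filterMap_congr
    intro k _
    have : ((1 : Int) + 2 * (k : Int)).toNat = 1 + 2 * k := by omega
    rw [this]

-- ---------- foldl shapes ----------
theorem foldl_if_filter {α β : Type} (c : α → Prop) [DecidablePred c] (g : β → α → β) :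
    ∀ (L : List α) (init : β),
      L.foldl (fun acc j => if c j then g acc j else acc) init
        = (L.filter (fun j => decide (c j))).foldl g init := by
  intro L
  induction L with
  | nil => intro init; rfl
  | cons x xs ih =>
      intro init
      by_cases hx : c x
      · simp [List.filter_cons, hx, ih]
      · simp [List.filter_cons, hx, ih]

theorem applyCaps_append (P Q : List Nat) (xs : List String) :
    applyCaps (P ++ Q) xs = applyCaps Q (applyCaps P xs) := by
  unfold applyCaps
  rw [List.foldl_append]

theorem getElem?_applyCaps (P : List Nat) (k : Nat) : ∀ (xs : List String),
    (∀ p ∈ P, p < xs.length) →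
    (applyCaps P xs)[k]? = if k ∈ P then (xs[k]?).map capW else xs[k]? := by
  induction P with
  | nil => intro xs _; simp [applyCaps]
  | cons p P ih =>
      intro xs hP
      have hp : p < xs.length := hP p (by simp)
      have hstep : applyCaps (p :: P) xs = applyCaps P (xs.set p (capW (xs.getD p ""))) := rfl
      rw [hstep, ih _ (by intro q hq; simpa using hP q (List.mem_cons_of_mem _ hq))]
      have hgd : xs.getD p "" = xs[p] := List.getD_eq_getElem xs "" hp
      by_cases hpk : p = k
      · subst hpk
        have hset : (xs.set p (capW (xs.getD p "")))[p]? = some (capW (xs[p])) := by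
          simp [List.getElem?_set, hp, hgd]
        by_cases hkP : p ∈ P
        · rw [if_pos hkP, if_pos (by simp)]
          rw [hset]
          simp [List.getElem?_eq_getElem hp, capW_idem]
        · rw [if_neg hkP, if_pos (by simp), hset]
          simp [List.getElem?_eq_getElem hp]
      · have hset : (xs.set p (capW (xs.getD p "")))[k]? = xs[k]? := by
          simp [List.getElem?_set, hpk]
        rw [hset]
        by_cases hkP : k ∈ P
        · rw [if_pos hkP, if_pos (by simp [hkP])]
        · rw [if_neg hkP, if_neg (by simp [hkP, Ne.symm hpk])]

-- ---------- pointwise description of the result ----------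
theorem getElem?_specGo (sent : List String) (n : Nat) :
    ∀ (L : List String) (i k : Nat),
      (specGo sent n L i)[k]? = (L[k]?).map
        (fun w => if capIdx sent n (i + k) then capW w else w) := by
  intro L
  induction L with
  | nil => intro i k; simp [specGo]
  | cons w rest ih =>
      intro i k
      cases k with
      | zero => simp [specGo]
      | succ k =>
          simp only [specGo, List.getElem?_cons_succ]
          rw [ih (i + 1) k]
          have : i + 1 + k = i + (k + 1) := by omega
          rw [this]

-- ---------- counting and parity ----------
theorem countConv (sent : List String) (j : Nat) (hj : j ≤ sent.length - 1)
    (hne : sent ≠ []) :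
    (natQuote sent).countP (fun x => decide (x < j)) = quoteCnt sent j := by
  have hn : 1 ≤ sent.length := by
    cases sent with
    | nil => exact absurd rfl hne
    | cons a l => simp
  unfold natQuote quoteCnt
  rw [List.countP_filter]
  rw [show List.range sent.length = List.range j ++ ((List.range (sent.length - j)).map (j + ·))
      from by rw [← List.range_add]; congr 1; omega]
  rw [List.countP_append]
  have h2 : (List.countP (fun a => decide (a < j) && decide (sent.getD a "" = "\"" ∧ a ≠ sent.length - 1))
      ((List.range (sent.length - j)).map (j + ·))) = 0 := by
    rw [List.countP_eq_zero]
    intro y hy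
    rcases List.mem_map.mp hy with ⟨k, _, rfl⟩
    simp
  rw [h2]
  have h1 : ∀ a ∈ List.range j,
      (decide (a < j) && decide (sent.getD a "" = "\"" ∧ a ≠ sent.length - 1))
        = decide (sent.getD a "" = "\"") := by
    intro a ha
    have haj : a < j := List.mem_range.mp ha
    by_cases hq : sent.getD a "" = "\""
    · simp [haj, hq]
      omega
    · simp only [List.getD_eq_getElem?_getD] at hq
      simp [haj, hq]
  rw [List.countP_congr (fun a ha => by rw [h1 a ha])]
  omega

theorem parityMem : ∀ (L : List Nat), L.Pairwise (· < ·) → ∀ (b : Bool) (a : Nat),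
    a ∈ everyOther b L ↔
      a ∈ L ∧ L.countP (fun x => decide (x < a)) % 2 = (if b then 0 else 1) := by
  intro L
  induction L with
  | nil => intro _ b a; simp [everyOther]
  | cons x xs ih =>
      intro hpw b a
      have hx : ∀ y ∈ xs, x < y := fun y hy => List.rel_of_pairwise_cons hpw hy
      have ihx := ih (List.Pairwise.of_cons hpw)
      have hcnt : (x :: xs).countP (fun x => decide (x < a)) =
          xs.countP (fun x => decide (x < a)) + (if x < a then 1 else 0) := by
        rw [List.countP_cons]
        by_cases h : x < a <;> simp [h]
      have hcnt0 : a = x → (x :: xs).countP (fun x => decide (x < a)) = 0 := by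
        intro ha
        rw [List.countP_eq_zero]
        intro y hy
        simp only [decide_eq_true_eq]
        rcases List.mem_cons.mp hy with rfl | hy'
        · omega
        · have := hx y hy'; omega
      have hcntpos : a ∈ xs → (x :: xs).countP (fun x => decide (x < a)) =
          xs.countP (fun x => decide (x < a)) + 1 := by
        intro hmem
        rw [hcnt, if_pos (hx a hmem)]
      cases b with
      | true =>
          show a ∈ x :: everyOther false xs ↔ _
          rw [List.mem_cons]
          constructor
          · rintro (ha | hmem)
            · refine ⟨by simp [ha], ?_⟩
              rw [hcnt0 ha]
              simp
            · have hmem' := (ihx false a).mp hmem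
              refine ⟨by simp [hmem'.1], ?_⟩
              rw [hcntpos hmem'.1]
              have h2 := hmem'.2
              norm_num at h2 ⊢
              omega
          · rintro ⟨hmem, hpar⟩
            rcases List.mem_cons.mp hmem with ha | hmem'
            · exact Or.inl ha
            · right
              rw [hcntpos hmem'] at hpar
              refine (ihx false a).mpr ⟨hmem', ?_⟩
              simp at hpar ⊢
              omega
      | false =>
          show a ∈ everyOther true xs ↔ _
          rw [ihx true a]
          norm_num
          constructor
          · rintro ⟨hmem, hpar⟩
            refine ⟨by simp [hmem], ?_⟩
            rw [hcntpos hmem]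
            omega
          · rintro ⟨hmem, hpar⟩
            rcases hmem with ha | hmem'
            · rw [hcnt0 ha] at hpar
              simp at hpar
            · rw [hcntpos hmem'] at hpar
              exact ⟨hmem', by omega⟩

theorem pairwise_natQuote (sent : List String) : (natQuote sent).Pairwise (· < ·) := by
  unfold natQuote
  exact List.Pairwise.sublist (List.filter_sublist) (List.pairwise_lt_range)

-- ---------- port A = pointwise spec ----------
theorem portA_applyCaps (sent : List String) (h : sent ≠ []) :
    naive_recase sent =
      applyCaps ([0] ++ (natEos sent).map (· + 1)
          ++ (everyOther true (natQuote sent)).map (· + 1)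
          ++ ((everyOther false (natQuote sent)).filter
                (fun j => decide (1 ≤ j ∧ j - 1 ∈ natEos sent))).map (· + 1)) sent := by
  unfold naive_recase
  rw [if_neg h]
  simp only [eosP_eq sent h, quoteP_eq sent h, slice2_none, slice2_one, Option.getD_some,
    everyOther_map]
  rw [applyCaps_append, applyCaps_append, applyCaps_append]
  simp only [applyCaps, List.foldl_map, List.foldl_cons, List.foldl_nil]
  simp only [show ∀ (i : Nat), ((i : Int) + 1) = (((i + 1 : Nat)) : Int) from
    by intro i; push_cast; ring]
  simp only [PySem.List.pySetD_natCast, PySem.List.pyGetD_natCast, mem_map_natCast_sub_one]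
  rw [foldl_if_filter]
  simp only [show ((0 : Int)) = (((0 : Nat) : Int)) from by norm_num,
    PySem.List.pySetD_natCast, PySem.List.pyGetD_natCast]

theorem mem_cap_iff (sent : List String) (hne : sent ≠ []) (k : Nat) (hk : k < sent.length) :
    (k ∈ ([0] ++ (natEos sent).map (· + 1)
          ++ (everyOther true (natQuote sent)).map (· + 1)
          ++ ((everyOther false (natQuote sent)).filter
                (fun j => decide (1 ≤ j ∧ j - 1 ∈ natEos sent))).map (· + 1)))
      ↔ capIdx sent sent.length k = true := by
  have hn1 : 1 ≤ sent.length := by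
    cases sent with
    | nil => exact absurd rfl hne
    | cons a l => simp
  cases k with
  | zero => simp [capIdx]
  | succ j =>
      have hj : j < sent.length - 1 := by omega
      show _ ↔ trigB sent sent.length j = true
      simp only [List.mem_append, List.mem_cons, List.mem_map, List.mem_filter,
        List.not_mem_nil, or_false, decide_eq_true_eq]
      have hEos : ∀ m, m ∈ natEos sent ↔
          (m < sent.length ∧ (sent.getD m "" ∈ eosL ∧ m ≠ sent.length - 1)) := by
        intro m
        unfold natEos
        rw [List.mem_filter, List.mem_range]
        simp
      have hQ : ∀ m, m ∈ natQuote sent ↔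
          (m < sent.length ∧ (sent.getD m "" = "\"" ∧ m ≠ sent.length - 1)) := by
        intro m
        unfold natQuote
        rw [List.mem_filter, List.mem_range]
        simp
      have hparT : j ∈ everyOther true (natQuote sent) ↔
          (j ∈ natQuote sent ∧ quoteCnt sent j % 2 = 0) := by
        rw [parityMem (natQuote sent) (pairwise_natQuote sent) true j,
          countConv sent j (by omega) hne]
        norm_num
      have hparF : j ∈ everyOther false (natQuote sent) ↔
          (j ∈ natQuote sent ∧ quoteCnt sent j % 2 = 1) := by
        rw [parityMem (natQuote sent) (pairwise_natQuote sent) false j,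
          countConv sent j (by omega) hne]
        norm_num
      have hcntpos : quoteCnt sent j % 2 = 1 → 1 ≤ j := by
        intro hp
        by_contra hcon
        have : j = 0 := by omega
        subst this
        simp [quoteCnt] at hp
      simp only [add_left_inj, exists_eq_right, Nat.succ_ne_zero, false_or,
        hparT, hparF, hEos, hQ]
      unfold trigB
      rw [if_neg (show ¬ j = sent.length - 1 by omega)]
      by_cases heos : sent.getD j "" ∈ eosL
      · rw [if_pos heos]
        refine iff_of_true ?_ rfl
        exact Or.inl (Or.inl ⟨by omega, heos, by omega⟩)
      · rw [if_neg heos]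
        by_cases hq : sent.getD j "" = "\""
        · rw [if_pos hq]
          by_cases hpe : quoteCnt sent j % 2 = 0
          · refine iff_of_true ?_ (by simp [hpe])
            exact Or.inl (Or.inr ⟨⟨by omega, hq, by omega⟩, hpe⟩)
          · have hpo : quoteCnt sent j % 2 = 1 := by omega
            have hj1 : 1 ≤ j := hcntpos hpo
            constructor
            · rintro ((⟨_, he, _⟩ | ⟨_, hp⟩) | ⟨⟨_, _⟩, _, _, hep, _⟩)
              · exact absurd he heos
              · exact absurd hp hpe
              · simp only [List.getD_eq_getElem?_getD] at hep
                simp [hep]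
            · intro hb
              have heprev : sent.getD (j - 1) "" ∈ eosL := by
                simpa [hpe] using hb
              exact Or.inr ⟨⟨⟨by omega, hq, by omega⟩, hpo⟩, hj1, by omega, heprev, by omega⟩
        · rw [if_neg hq]
          refine iff_of_false ?_ (by simp)
          rintro ((⟨_, he, _⟩ | ⟨⟨_, hqq, _⟩, _⟩) | ⟨⟨⟨_, hqq, _⟩, _⟩, _⟩)
          · exact absurd he heos
          · exact absurd hqq hq
          · exact absurd hqq hq

theorem portA_spec (sent : List String) (h : sent ≠ []) :
    naive_recase sent = specGo sent sent.length sent 0 := by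
  have hn1 : 1 ≤ sent.length := by
    cases sent with
    | nil => exact absurd rfl h
    | cons a l => simp
  rw [portA_applyCaps sent h]
  apply List.ext_getElem?
  intro k
  have hP : ∀ p ∈ ([0] ++ (natEos sent).map (· + 1)
      ++ (everyOther true (natQuote sent)).map (· + 1)
      ++ ((everyOther false (natQuote sent)).filter
            (fun j => decide (1 ≤ j ∧ j - 1 ∈ natEos sent))).map (· + 1)),
      p < sent.length := by
    intro p hp
    simp only [List.mem_append, List.mem_cons, List.mem_map, List.not_mem_nil,
      or_false, List.mem_filter] at hp
    have hQlt : ∀ a, a ∈ natQuote sent → a < sent.length - 1 := by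
      intro a ha
      unfold natQuote at ha
      rw [List.mem_filter, List.mem_range] at ha
      have := ha.2
      simp at this
      omega
    rcases hp with ((hp0 | ⟨a, ha, rfl⟩) | ⟨a, ha, rfl⟩) | ⟨a, ⟨ha, _⟩, rfl⟩
    · omega
    · unfold natEos at ha
      rw [List.mem_filter, List.mem_range] at ha
      have := ha.2
      simp at this
      omega
    · have := hQlt a (mem_everyOther _ _ _ ha)
      omega
    · have := hQlt a (mem_everyOther _ _ _ ha)
      omega
  rw [getElem?_applyCaps _ k sent hP, getElem?_specGo]
  by_cases hk : k < sent.length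
  · simp only [mem_cap_iff sent h k hk]
    rw [List.getElem?_eq_getElem hk]
    by_cases hc : capIdx sent sent.length k = true
    · simp [hc]
    · simp [hc]
  · have : sent[k]? = none := by
      rw [List.getElem?_eq_none_iff]
      omega
    rw [this]
    simp

-- ---------- port B = pointwise spec ----------
theorem quoteCnt_succ (sent : List String) (i : Nat) :
    quoteCnt sent (i + 1) =
      quoteCnt sent i + (if sent.getD i "" = "\"" then 1 else 0) := by
  unfold quoteCnt
  rw [List.range_succ, List.countP_append]
  simp [List.countP_cons]

theorem altGo_eq (sent : List String) :
    ∀ (rest : List String) (i q : Nat) (b : Bool),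
      sent.drop i = rest → q = quoteCnt sent i → b = capIdx sent sent.length i →
      altGo sent sent.length rest i q b = specGo sent sent.length rest i := by
  intro rest
  induction rest with
  | nil => intro i q b _ _ _; rfl
  | cons w rest ih =>
      intro i q b hdrop hq hb
      have hw? : sent[i]? = some w := by
        have h0 : (sent.drop i)[0]? = sent[i + 0]? := List.getElem?_drop
        rw [hdrop] at h0
        simpa using h0.symm
      obtain ⟨hi, hwi⟩ := List.getElem?_eq_some_iff.mp hw?
      have hw : sent.getD i "" = w := by
        rw [List.getD_eq_getElem?_getD, hw?]
        rfl
      have hdrop' : sent.drop (i + 1) = rest := by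
        rw [← List.tail_drop, hdrop]
        rfl
      have hstep : altGo sent sent.length (w :: rest) i q b
          = (if b then capW w else w) ::
            altGo sent sent.length rest (i + 1)
              (if i = sent.length - 1 then ((false, q) : Bool × Nat)
               else if w ∈ eosL then (true, q)
               else if w = "\"" then
                 (decide (q % 2 = 0) || decide (sent.getD (i - 1) "" ∈ eosL), q + 1)
               else (false, q)).2
              (if i = sent.length - 1 then ((false, q) : Bool × Nat)
               else if w ∈ eosL then (true, q)
               else if w = "\"" then
                 (decide (q % 2 = 0) || decide (sent.getD (i - 1) "" ∈ eosL), q + 1)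
               else (false, q)).1 := rfl
      rw [hstep]
      show _ = (if capIdx sent sent.length i then capW w else w)
          :: specGo sent sent.length rest (i + 1)
      rw [hb]
      congr 1
      cases rest with
      | nil => rfl
      | cons w2 rest2 =>
          have hi1 : i + 1 < sent.length := by
            have h0 : (sent.drop (i + 1))[0]? = sent[(i + 1) + 0]? := List.getElem?_drop
            rw [hdrop'] at h0
            have : sent[i + 1]? = some w2 := by simpa using h0.symm
            exact (List.getElem?_eq_some_iff.mp this).1
          have hin : ¬ i = sent.length - 1 := by omega
          refine ih (i + 1) _ _ hdrop' ?_ ?_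
          · rw [if_neg hin, quoteCnt_succ, hw, ← hq]
            by_cases he : w ∈ eosL
            · have hwq : ¬ w = "\"" := fun hcon => absurd (hcon ▸ he) (by decide)
              rw [if_pos he, if_neg hwq]
              rfl
            · rw [if_neg he]
              by_cases hqw : w = "\""
              · rw [if_pos hqw, if_pos hqw]
              · rw [if_neg hqw, if_neg hqw]
                rfl

          · show _ = trigB sent sent.length i
            unfold trigB
            rw [if_neg hin, hw, ← hq]
            split_ifs <;> rfl

theorem portB_spec (sent : List String) (h : sent ≠ []) :
    naive_recase_alt sent = specGo sent sent.length sent 0 := by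
  unfold naive_recase_alt
  rw [if_neg h]
  exact altGo_eq sent sent 0 0 true rfl rfl rfl

-- ===== VERDICT (by name: the statement is the Claim_ definition above) =====
theorem naive_recase_spec : Claim_equal_naive_recase := by
  intro sent _
  unfold Spec_naive_recase
  by_cases h : sent = []
  · subst h; rfl
  · rw [portA_spec sent h, portB_spec sent h]
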